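-- pv_equiv track=rewrite | github.com/jfulghum/practice_thy_algos | remove_consecutive_chars.py | remove_extra_consecutive
-- ===== SOURCE A (Python) =====
-- def remove_extra_consecutive(input_str, max_consecutive_chars):
--   output = ""
--   consecutive_count = 0
--   prev_char = None
--   for current_char in input_str:
--     if prev_char == current_char:
--       consecutive_count += 1
--     else:
--       consecutive_count = 0
--       prev_char = current_char
--     if consecutive_count < max_consecutive_chars:
--       output += current_char
--   return output
-- ===== SOURCE B (Python) =====
-- from itertools import groupby
--
-- def remove_extra_consecutive(input_str, max_consecutive_chars):
--     return "".join(
--         char * min(len(list(group)), max_consecutive_chars)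
--         for char, group in groupby(input_str)
--     )
-- ===== Notes on version B (the rewrite author's own statement) =====
-- stated objective: idiomatic
-- what changed: Replaced the running prev_char/consecutive_count state machine with itertools.groupby: split the string into maximal runs and emit char * min(run_length, max_consecutive_chars) per run.
import Mathlib
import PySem

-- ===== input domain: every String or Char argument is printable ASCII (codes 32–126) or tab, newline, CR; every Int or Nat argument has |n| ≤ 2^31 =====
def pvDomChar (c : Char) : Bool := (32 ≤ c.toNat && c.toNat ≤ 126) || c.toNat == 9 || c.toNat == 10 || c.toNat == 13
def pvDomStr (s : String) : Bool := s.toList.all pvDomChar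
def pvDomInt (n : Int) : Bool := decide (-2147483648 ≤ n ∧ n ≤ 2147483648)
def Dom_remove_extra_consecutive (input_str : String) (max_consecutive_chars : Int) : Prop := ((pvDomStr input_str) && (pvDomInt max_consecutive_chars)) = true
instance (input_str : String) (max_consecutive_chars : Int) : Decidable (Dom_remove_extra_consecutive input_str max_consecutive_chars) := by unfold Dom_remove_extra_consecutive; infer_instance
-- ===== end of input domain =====

-- B re-implements A with a groupby (run-length) decomposition instead of the running
-- prev_char/consecutive_count state machine; objective: idiomatic, same behaviour, same cost.

-- ===== PORT A =====
-- one loop step of A: update consecutive_count/prev_char, then append if count < max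
def pvAStep (m : Int) (st : List Char × Int × Option Char) (c : Char) :
    List Char × Int × Option Char :=
  let out := st.1
  let cnt := st.2.1
  let prev := st.2.2
  let cnt' := if prev == some c then cnt + 1 else 0
  let prev' := if prev == some c then prev else some c
  (if cnt' < m then out ++ [c] else out, cnt', prev')

def remove_extra_consecutive (input_str : String) (max_consecutive_chars : Int) : String :=
  String.ofList (input_str.toList.foldl (pvAStep max_consecutive_chars) ([], 0, none)).1

-- ===== PORT B =====
-- groupby(input_str): peel off the maximal run of the head char, emit min(run_len, max) copies
def pvBGo (m : Int) : List Char → List Char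
  | [] => []
  | c :: rest =>
    List.replicate (min ((1 : Int) + (rest.takeWhile (· == c)).length) m).toNat c
      ++ pvBGo m (rest.dropWhile (· == c))
termination_by l => l.length
decreasing_by
  simp only [List.length_cons]
  exact Nat.lt_succ_of_le (List.length_dropWhile_le _ _)

def remove_extra_consecutive_alt (input_str : String) (max_consecutive_chars : Int) : String :=
  String.ofList (pvBGo max_consecutive_chars input_str.toList)

-- ===== PRECONDITION & SPEC =====
def Spec_remove_extra_consecutive (input_str : String) (max_consecutive_chars : Int) (out : String) : Prop := out = remove_extra_consecutive_alt input_str max_consecutive_chars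
instance (input_str : String) (max_consecutive_chars : Int) (out : String) : Decidable (Spec_remove_extra_consecutive input_str max_consecutive_chars out) := by unfold Spec_remove_extra_consecutive; infer_instance

-- ===== CLAIM (what is proved, stated in full; the proofs are below) =====
def Claim_equal_remove_extra_consecutive : Prop := ∀ (input_str : String) (max_consecutive_chars : Int), Dom_remove_extra_consecutive input_str max_consecutive_chars → Spec_remove_extra_consecutive input_str max_consecutive_chars (remove_extra_consecutive input_str max_consecutive_chars)

-- ===== LEMMAS AND PROOFS =====

-- A's fold over a run of j copies of c, with prev already c and count k
theorem pvA_run (m : Int) (c : Char) :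
    ∀ (j : Nat) (out : List Char) (k : Int),
      List.foldl (pvAStep m) (out, k, some c) (List.replicate j c)
        = (out ++ List.replicate (min (k + j) (m - 1) - k).toNat c, k + (j : Int), some c) := by
  intro j
  induction j with
  | zero =>
    intro out k
    simp
  | succ j ih =>
    intro out k
    rw [List.replicate_succ, List.foldl_cons]
    have hstep : pvAStep m (out, k, some c) c
        = (if k + 1 < m then out ++ [c] else out, k + 1, some c) := by
      simp [pvAStep]
    rw [hstep, ih]
    by_cases h : k + 1 < m
    · simp only [if_pos h]
      have harith : (min (k + 1 + (j : Int)) (m - 1) - (k + 1)).toNat + 1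
          = (min (k + ((j : Int) + 1)) (m - 1) - k).toNat := by omega
      have hrep : (out ++ [c]) ++ List.replicate (min (k + 1 + (j : Int)) (m - 1) - (k + 1)).toNat c
          = out ++ List.replicate (min (k + ((j : Int) + 1)) (m - 1) - k).toNat c := by
        rw [List.append_assoc, ← harith]
        simp [List.replicate_succ]
      rw [hrep]
      push_cast
      have he : k + 1 + (j : Int) = k + ((j : Int) + 1) := by ring
      rw [he]
    · simp only [if_neg h]
      have h1 : (min (k + 1 + (j : Int)) (m - 1) - (k + 1)).toNat
          = (min (k + ((j : Int) + 1)) (m - 1) - k).toNat := by omega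
      rw [h1]
      push_cast
      have he : k + 1 + (j : Int) = k + ((j : Int) + 1) := by ring
      rw [he]

theorem pvBeq_false {prev : Option Char} {c : Char} (h : prev ≠ some c) :
    (prev == some c) = false := by
  exact beq_eq_false_iff_ne.mpr h

theorem pvDropWhileHead (p : Char → Bool) :
    ∀ (l : List Char) (d : Char), (l.dropWhile p).head? = some d → p d = false := by
  intro l
  induction l with
  | nil => intro d h; cases h
  | cons a l ih =>
    intro d h
    by_cases hp : p a
    · rw [List.dropWhile_cons_of_pos hp] at h
      exact ih d h
    · rw [List.dropWhile_cons_of_neg hp] at h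
      rw [List.head?_cons, Option.some_inj] at h
      rw [← h]
      exact Bool.eq_false_iff.mpr hp

-- main invariant: from any state whose prev_char differs from the head of l,
-- A's fold appends exactly B's run-length output
theorem pvMain (m : Int) :
    ∀ (n : Nat) (l : List Char), l.length ≤ n →
      ∀ (out : List Char) (k : Int) (prev : Option Char),
        (∀ c, l.head? = some c → prev ≠ some c) →
        (List.foldl (pvAStep m) (out, k, prev) l).1 = out ++ pvBGo m l := by
  intro n
  induction n with
  | zero =>
    intro l hl out k prev _
    match l, hl with
    | [], _ => simp [pvBGo]
  | succ n ih =>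
    intro l hl out k prev hprev
    match l with
    | [] => rw [pvBGo]; simp
    | c :: rest =>
      have hne : prev ≠ some c := hprev c rfl
      have hstep : pvAStep m (out, k, prev) c
          = (if 0 < m then out ++ [c] else out, 0, some c) := by
        simp [pvAStep, pvBeq_false hne]
      have hsplit : rest = rest.takeWhile (· == c) ++ rest.dropWhile (· == c) :=
        (List.takeWhile_append_dropWhile).symm
      set tw := rest.takeWhile (· == c) with htw
      set dw := rest.dropWhile (· == c) with hdw
      have hrepl : tw = List.replicate tw.length c := by
        apply List.eq_replicate_of_mem
        intro b hb
        have := List.mem_takeWhile_imp hb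
        simpa [beq_iff_eq] using this
      have hdwhead : ∀ d, dw.head? = some d → (some c : Option Char) ≠ some d := by
        intro d hd he
        have : (d == c) = false := pvDropWhileHead (· == c) rest d (by rw [← hdw]; exact hd)
        rw [Option.some_inj] at he
        rw [he] at this
        simp at this
      have hdwlen : dw.length ≤ n := by
        have h1 : dw.length ≤ rest.length := List.length_dropWhile_le _ _
        have h2 : rest.length + 1 ≤ n + 1 := by simpa using hl
        omega
      rw [List.foldl_cons, hstep]
      conv_lhs => rw [hsplit, hrepl]
      rw [List.foldl_append, pvA_run m c tw.length _ 0, ih dw hdwlen _ _ _ hdwhead]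
      rw [pvBGo]
      rw [← htw, ← hdw]
      by_cases hm : 0 < m
      · simp only [if_pos hm, List.append_assoc]
        congr 1
        have harith : (min ((0 : Int) + tw.length) (m - 1) - 0).toNat + 1
            = (min ((1 : Int) + tw.length) m).toNat := by omega
        rw [← harith, List.replicate_succ]
        simp
      · simp only [if_neg hm]
        have h0 : (min ((0 : Int) + tw.length) (m - 1) - 0).toNat = 0 := by omega
        have h0' : (min ((1 : Int) + tw.length) m).toNat = 0 := by omega
        rw [h0, h0']
        simp

-- ===== VERDICT (by name: the statement is the Claim_ definition above) =====
theorem remove_extra_consecutive_spec : Claim_equal_remove_extra_consecutive := by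
  intro s m _
  unfold Spec_remove_extra_consecutive remove_extra_consecutive remove_extra_consecutive_alt
  have := pvMain m s.toList.length s.toList le_rfl [] 0 none (by intro c _ h; cases h)
  rw [this]
  rfl
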